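-- pv_equiv track=rewrite | github.com/JackHopkins/PaperclipMaximiser | src/datasetgen/mcts/conversation_formatter.py | summarize_code_block
-- ===== SOURCE A (Python) =====
-- def summarize_code_block(code: str, start_line: int = None, end_line: int = None,
--                          preserve_comments: bool = True) -> str:
--     """
--     Summarize a code block by replacing code sections with line count indicators.
--     Handles both inline (#) and block (\"\"\") comments.
--     """
--     lines = code.splitlines()
--
--     if not lines:
--         return ""
--
--     result = []
--     code_start = None
--     code_lines = 0
--     in_docstring = False
--
--     for i, line in enumerate(lines, 1):
--         stripped = line.strip()
--
--         # Handle docstring boundaries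
--         if stripped.startswith('"""'):
--             if not in_docstring:  # Start of docstring
--                 if code_start is not None:
--                     if code_lines == 1:
--                         result.append(f"<LINE {code_start} CUT/>")
--                     else:
--                         result.append(f"<LINES {code_start}-{code_start + code_lines - 1} CUT/>")
--                     code_start = None
--                     code_lines = 0
--                 in_docstring = True
--                 result.append(line)
--                 continue
--
--         if in_docstring:
--             result.append(line)
--             if stripped.endswith('"""'):
--                 in_docstring = False
--             continue
--
--         # Handle regular comments and code
--         if stripped.startswith('#'):
--             if code_start is not None:
--                 if code_lines == 1:
--                     result.append(f"<LINE {code_start} CUT/>")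
--                 else:
--                     result.append(f"<LINES {code_start}-{code_start + code_lines - 1} CUT/>")
--                 code_start = None
--                 code_lines = 0
--             result.append(line)
--         else:
--             if stripped:
--                 if code_start is None:
--                     code_start = i
--                 code_lines += 1
--
--     # Handle any remaining code section
--     if code_start is not None:
--         if code_lines == 1:
--             result.append(f"<LINE {code_start} CUT/>")
--         else:
--             result.append(f"<LINES {code_start}-{code_start + code_lines - 1} CUT/>")
--
--     return '\n'.join(result)
-- ===== SOURCE B (Python) =====
-- def summarize_code_block(code: str, start_line: int = None, end_line: int = None,
--                          preserve_comments: bool = True) -> str: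
--     """Two-pass rewrite: classify each line, then emit verbatim lines and
--     collapse runs of code lines into CUT markers."""
--     lines = code.splitlines()
--
--     # Pass 1: classify lines as verbatim (docstring/comment) or code (line number).
--     items = []
--     in_docstring = False
--     for i, line in enumerate(lines, 1):
--         stripped = line.strip()
--         if in_docstring:
--             items.append(line)
--             if stripped.endswith('"""'):
--                 in_docstring = False
--         elif stripped.startswith('"""'):
--             in_docstring = True
--             items.append(line)
--         elif stripped.startswith('#'):
--             items.append(line)
--         elif stripped:
--             items.append(i)
--         # blank lines outside docstrings disappear entirely
--
--     # Pass 2: emit verbatim lines, collapsing runs of code line numbers.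
--     out = []
--     run = []
--
--     def flush():
--         if run:
--             start, n = run[0], len(run)
--             out.append(f"<LINE {start} CUT/>" if n == 1
--                        else f"<LINES {start}-{start + n - 1} CUT/>")
--             run.clear()
--
--     for item in items:
--         if isinstance(item, int):
--             run.append(item)
--         else:
--             flush()
--             out.append(item)
--     flush()
--     return '\n'.join(out)
-- ===== Notes on version B (the rewrite author's own statement) =====
-- stated objective: alternative
-- what changed: Replaces A's single stateful loop (carrying code_start/code_lines and flushing inline at three separate sites) with two passes: a classifier that tags each line as verbatim or a code line number, then an emitter that collapses runs of code line numbers into markers with one flush point.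
import Mathlib
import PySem

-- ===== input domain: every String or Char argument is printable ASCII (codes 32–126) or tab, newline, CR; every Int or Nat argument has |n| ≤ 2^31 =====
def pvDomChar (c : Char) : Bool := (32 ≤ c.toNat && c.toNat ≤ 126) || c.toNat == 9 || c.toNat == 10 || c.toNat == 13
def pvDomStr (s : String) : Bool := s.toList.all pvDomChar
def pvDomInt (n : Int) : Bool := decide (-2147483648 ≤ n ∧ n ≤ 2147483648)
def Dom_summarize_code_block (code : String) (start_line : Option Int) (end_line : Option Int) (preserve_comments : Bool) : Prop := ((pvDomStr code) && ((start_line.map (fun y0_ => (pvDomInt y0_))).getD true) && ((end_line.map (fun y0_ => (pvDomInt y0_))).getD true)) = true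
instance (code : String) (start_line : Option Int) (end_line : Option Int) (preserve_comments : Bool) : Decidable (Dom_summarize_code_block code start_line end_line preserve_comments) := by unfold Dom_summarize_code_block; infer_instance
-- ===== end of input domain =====

-- B is an alternative decomposition (classify pass + emit pass) of A's single
-- stateful loop; both are proved to return the same string on every input.

-- ===== PORT A =====
-- A's inline flush block (appears verbatim at three sites in the Python):
-- "if code_lines == 1: <LINE s CUT/> else <LINES s-(s+cl-1) CUT/>"
def pvMarkA (code_start : Int) (code_lines : Int) : String :=
  if code_lines == 1 then "<LINE " ++ PySem.Int.toStr code_start ++ " CUT/>"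
  else "<LINES " ++ PySem.Int.toStr code_start ++ "-" ++ PySem.Int.toStr (code_start + code_lines - 1) ++ " CUT/>"

-- the for-loop over enumerate(lines, 1) with its carried state, then the
-- trailing "remaining code section" flush
def pvALoop (ls : List String) (i : Int) (result : List String)
    (code_start : Option Int) (code_lines : Int) (in_docstring : Bool) : List String :=
  match ls with
  | [] =>
      match code_start with
      | none => result
      | some s => result ++ [pvMarkA s code_lines]
  | line :: rest =>
      let stripped := PySem.Str.strip line
      if PySem.Str.startswith stripped "\"\"\"" && !in_docstring then
        let result :=
          (match code_start with
           | none => result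
           | some s => result ++ [pvMarkA s code_lines]) ++ [line]
        pvALoop rest (i + 1) result none 0 true
      else if in_docstring then
        pvALoop rest (i + 1) (result ++ [line]) code_start code_lines
          (!PySem.Str.endswith stripped "\"\"\"")
      else if PySem.Str.startswith stripped "#" then
        let result :=
          (match code_start with
           | none => result
           | some s => result ++ [pvMarkA s code_lines]) ++ [line]
        pvALoop rest (i + 1) result none 0 in_docstring
      else if stripped ≠ "" then
        let code_start := match code_start with | none => some i | some s => some s
        pvALoop rest (i + 1) result code_start (code_lines + 1) in_docstring
      else
        pvALoop rest (i + 1) result code_start code_lines in_docstring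

def summarize_code_block (code : String) (start_line : Option Int) (end_line : Option Int) (preserve_comments : Bool) : String :=
  let lines := PySem.Str.splitlines code
  if lines = [] then ""
  else PySem.Str.join "\n" (pvALoop lines 1 [] none 0 false)

-- ===== PORT B =====
-- a classified line: a verbatim line (docstring/comment) or a code line number
inductive PVItem : Type
  | verb : String → PVItem
  | codeln : Int → PVItem
deriving DecidableEq, Repr

-- pass 1: the classifier (blank lines outside docstrings disappear)
def pvClassify (ls : List String) (i : Int) (in_docstring : Bool) : List PVItem :=
  match ls with
  | [] => []
  | line :: rest =>
      let stripped := PySem.Str.strip line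
      if in_docstring then
        .verb line :: pvClassify rest (i + 1) (!PySem.Str.endswith stripped "\"\"\"")
      else if PySem.Str.startswith stripped "\"\"\"" then
        .verb line :: pvClassify rest (i + 1) true
      else if PySem.Str.startswith stripped "#" then
        .verb line :: pvClassify rest (i + 1) false
      else if stripped ≠ "" then
        .codeln i :: pvClassify rest (i + 1) false
      else
        pvClassify rest (i + 1) false

-- B's flush(): collapse the pending run of code line numbers into one marker
def pvFlushB (out : List String) (run : List Int) : List String :=
  match run with
  | [] => out
  | s :: _ =>
      out ++ [if (run.length : Int) == 1 then "<LINE " ++ PySem.Int.toStr s ++ " CUT/>"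
              else "<LINES " ++ PySem.Int.toStr s ++ "-" ++ PySem.Int.toStr (s + (run.length : Int) - 1) ++ " CUT/>"]

-- pass 2: the emitter
def pvEmit (items : List PVItem) (out : List String) (run : List Int) : List String :=
  match items with
  | [] => pvFlushB out run
  | .codeln n :: rest => pvEmit rest out (run ++ [n])
  | .verb l :: rest => pvEmit rest (pvFlushB out run ++ [l]) []

def summarize_code_block_alt (code : String) (start_line : Option Int) (end_line : Option Int) (preserve_comments : Bool) : String :=
  let lines := PySem.Str.splitlines code
  PySem.Str.join "\n" (pvEmit (pvClassify lines 1 false) [] [])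

-- ===== PRECONDITION & SPEC =====
def Spec_summarize_code_block (code : String) (start_line : Option Int) (end_line : Option Int) (preserve_comments : Bool) (out : String) : Prop := out = summarize_code_block_alt code start_line end_line preserve_comments
instance (code : String) (start_line : Option Int) (end_line : Option Int) (preserve_comments : Bool) (out : String) : Decidable (Spec_summarize_code_block code start_line end_line preserve_comments out) := by unfold Spec_summarize_code_block; infer_instance

-- ===== CLAIM (what is proved, stated in full; the proofs are below) =====
def Claim_equal_summarize_code_block : Prop := ∀ (code : String) (start_line : Option Int) (end_line : Option Int) (preserve_comments : Bool), Dom_summarize_code_block code start_line end_line preserve_comments → Spec_summarize_code_block code start_line end_line preserve_comments (summarize_code_block code start_line end_line preserve_comments)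

-- ===== LEMMAS AND PROOFS =====

-- A's inline flush equals B's flush when code_start/code_lines are the head
-- and length of B's pending run.
theorem flush_agree (result : List String) (run : List Int) :
    (match run.head? with
     | none => result
     | some s => result ++ [pvMarkA s (run.length : Int)]) = pvFlushB result run := by
  cases run with
  | nil => rfl
  | cons s t => simp [pvFlushB, pvMarkA]

-- Loop invariant: A's state (code_start, code_lines) is the head and length of
-- B's pending run; inside a docstring the run is empty.
theorem loop_agree (ls : List String) (i : Int) (result : List String)
    (run : List Int) (in_docstring : Bool) (h : in_docstring = true → run = []) :
    pvALoop ls i result run.head? (run.length : Int) in_docstring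
      = pvEmit (pvClassify ls i in_docstring) result run := by
  induction ls generalizing i result run in_docstring with
  | nil =>
      simp only [pvALoop, pvClassify, pvEmit]
      exact flush_agree result run
  | cons line rest ih =>
      simp only [pvALoop, pvClassify]
      by_cases hd : in_docstring = true
      · subst hd
        have hr : run = [] := h rfl
        subst hr
        simp only [Bool.not_true, Bool.and_false, if_false, if_true, ite_true, Bool.false_eq_true]
        simp only [pvEmit]
        cases hend : PySem.Str.endswith (PySem.Str.strip line) "\"\"\"" with
        | true =>
            have := ih (i + 1) (pvFlushB result [] ++ [line]) [] false (by simp)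
            simpa [pvFlushB] using this
        | false =>
            have := ih (i + 1) (pvFlushB result [] ++ [line]) [] true (by simp)
            simpa [pvFlushB] using this
      · have hd' : in_docstring = false := by
          cases in_docstring; rfl; exact absurd rfl hd
        subst hd'
        by_cases h3 : PySem.Str.startswith (PySem.Str.strip line) "\"\"\"" = true
        · simp only [h3, Bool.not_false, Bool.and_true, if_true, ite_true, pvEmit]
          rw [flush_agree]
          exact ih (i + 1) (pvFlushB result run ++ [line]) [] true (by simp)
        · have h3' : PySem.Str.startswith (PySem.Str.strip line) "\"\"\"" = false :=
            by cases hx : PySem.Str.startswith (PySem.Str.strip line) "\"\"\""; rfl; exact absurd hx h3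
          simp only [h3', Bool.false_and, Bool.false_eq_true, if_false, ite_false]
          by_cases h4 : PySem.Str.startswith (PySem.Str.strip line) "#" = true
          · simp only [h4, if_true, ite_true, pvEmit]
            rw [flush_agree]
            exact ih (i + 1) (pvFlushB result run ++ [line]) [] false (by simp)
          · have h4' : PySem.Str.startswith (PySem.Str.strip line) "#" = false :=
              by cases hx : PySem.Str.startswith (PySem.Str.strip line) "#"; rfl; exact absurd hx h4
            simp only [h4', Bool.false_eq_true, if_false, ite_false]
            by_cases h5 : PySem.Str.strip line ≠ ""
            · rw [if_pos h5, if_pos h5]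
              simp only [pvEmit]
              have hhead : (match run.head? with
                  | none => some i
                  | some s => some s) = (run ++ [i]).head? := by
                cases run <;> simp
              have hlen : (run.length : Int) + 1 = ((run ++ [i]).length : Int) := by
                simp
              rw [hhead, hlen]
              exact ih (i + 1) result (run ++ [i]) false (by simp)
            · rw [if_neg h5, if_neg h5]
              exact ih (i + 1) result run false (by simp)

-- ===== VERDICT (by name: the statement is the Claim_ definition above) =====
theorem summarize_code_block_spec : Claim_equal_summarize_code_block := by
  intro code start_line end_line preserve_comments _
  show _ = _
  unfold summarize_code_block summarize_code_block_alt
  cases hls : PySem.Str.splitlines code with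
  | nil => simp [pvClassify, pvEmit, pvFlushB, PySem.Str.join]
  | cons l rest =>
      rw [if_neg (by simp : ¬ (l :: rest = []))]
      have h := loop_agree (l :: rest) 1 [] [] false (by simp)
      have e1 : (([] : List Int)).head? = none := rfl
      have e2 : ((([] : List Int)).length : Int) = 0 := rfl
      rw [e1, e2] at h
      rw [h]
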